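-- pv_equiv track=rewrite | github.com/strawberry-tree/ProblemSolving | 프로그래머스/2/131127. 할인 행사/할인 행사.py | solution
-- ===== SOURCE A (Python) =====
-- def solution(want, number, discount):
--     # 정현이가 원하는 상품 - 최대 10번 연산
--     want_number = dict()
--     for i in range(len(want)):
--         want_number[want[i]] = number[i]
--
--     # 딕셔너리에서 현재 할인상품 넣으면서 비교 - O(N)
--     result = 0
--     for i, name in enumerate(discount):
--         if name in want_number:
--             want_number[name] -= 1
--         if i >= 10 and discount[i - 10] in want_number:
--             want_number[discount[i - 10]] += 1
--
--         # want_number의 모든 value가 0 이하일 때 - 최대 10번 연산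
--         if all(x <= 0 for x in want_number.values()):
--             result += 1
--
--     return result
-- ===== SOURCE B (Python) =====
-- def solution(want, number, discount):
--     # Recompute each day's window from scratch: for day i the promotion window is
--     # discount[max(0, i-9) : i+1]; count it and check every wanted amount is covered.
--     want_map = {}
--     for w, n in zip(want, number):
--         want_map[w] = n
--     result = 0
--     for i in range(len(discount)):
--         counts = {}
--         for item in discount[max(0, i - 9):i + 1]:
--             counts[item] = counts.get(item, 0) + 1
--         if all(counts.get(k, 0) >= v for k, v in want_map.items()):
--             result += 1
--     return result
-- ===== Notes on version B (the rewrite author's own statement) =====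
-- stated objective: alternative
-- what changed: A maintains one running dict incrementally (decrement on entry, add back the element leaving the 10-wide window); B recomputes each day's window discount[max(0,i-9):i+1] from scratch with a fresh counter and checks every wanted amount is covered, with the want map built by zip instead of index loops.
import Mathlib
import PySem

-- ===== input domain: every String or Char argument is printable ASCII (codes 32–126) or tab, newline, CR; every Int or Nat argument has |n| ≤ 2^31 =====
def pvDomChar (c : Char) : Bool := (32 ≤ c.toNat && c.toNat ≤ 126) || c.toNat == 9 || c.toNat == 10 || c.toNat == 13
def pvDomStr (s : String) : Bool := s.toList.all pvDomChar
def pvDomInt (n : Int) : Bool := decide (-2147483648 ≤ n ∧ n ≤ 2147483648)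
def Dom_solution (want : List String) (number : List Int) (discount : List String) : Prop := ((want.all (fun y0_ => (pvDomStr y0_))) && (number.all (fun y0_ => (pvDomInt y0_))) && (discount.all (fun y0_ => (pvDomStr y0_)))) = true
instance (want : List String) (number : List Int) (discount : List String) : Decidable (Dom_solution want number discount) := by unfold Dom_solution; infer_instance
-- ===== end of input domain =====

-- B replaces A's incrementally maintained running dict by recomputing each 10-wide window
-- from scratch (alternative decomposition, same exact result; no speed claim).

-- ===== PORT A =====
-- want_number[want[i]] = number[i] for i in range(len(want)); `none` = IndexError, excluded by Pre_solution
def buildWantA (want : List String) (number : List Int) : PySem.Dict String Int :=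
  (PySem.List.pyRange 0 (PySem.List.len want) 1).foldl
    (fun d i =>
      match PySem.List.pyGet? want i, PySem.List.pyGet? number i with
      | some w, some n => d.insert w n
      | _, _ => d)
    PySem.Dict.empty

-- one iteration of A's `for i, name in enumerate(discount)` loop (state = (want_number, result))
def stepA (discount : List String) (st : PySem.Dict String Int × Int) (p : Int × String) :
    PySem.Dict String Int × Int :=
  let d1 := if st.1.contains p.2 then st.1.modify p.2 0 (· - 1) else st.1
  let d2 :=
    if (10 : Int) ≤ p.1 then
      -- discount[i-10] is always in range here (10 ≤ i < len(discount)), so pyGetD is exact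
      let prev := PySem.List.pyGetD discount (p.1 - 10) ""
      if d1.contains prev then d1.modify prev 0 (· + 1) else d1
    else d1
  (d2, if d2.values.all (fun x => decide (x ≤ 0)) then st.2 + 1 else st.2)

def solution (want : List String) (number : List Int) (discount : List String) : Int :=
  ((PySem.List.enumerate discount 0).foldl (stepA discount) (buildWantA want number, 0)).2

-- ===== PORT B =====
-- want_map built from zip(want, number), last wins on duplicate keys
def buildWantB (want : List String) (number : List Int) : PySem.Dict String Int :=
  (want.zip number).foldl (fun d p => d.insert p.1 p.2) PySem.Dict.empty

-- B's window of day i: discount[max(0, i-9) : i+1]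
def windowB (discount : List String) (i : Int) : List String :=
  PySem.List.slice discount (some (max 0 (i - 9))) (some (i + 1))

-- B's fresh counter of the window (counts[item] = counts.get(item, 0) + 1)
def countsB (discount : List String) (i : Int) : PySem.Dict String Int :=
  (windowB discount i).foldl (fun d x => d.insert x (d.getD x 0 + 1)) PySem.Dict.empty

-- one iteration of B's `for i in range(len(discount))`: slice the window, count it, test coverage
def stepB (discount : List String) (wm : PySem.Dict String Int) (result : Int) (i : Int) : Int :=
  if wm.items.all (fun p => decide (p.2 ≤ (countsB discount i).getD p.1 0)) then result + 1
  else result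

def solution_alt (want : List String) (number : List Int) (discount : List String) : Int :=
  (PySem.List.pyRange 0 (PySem.List.len discount) 1).foldl
    (stepB discount (buildWantB want number)) 0

-- ===== PRECONDITION & SPEC =====
-- A indexes number[i] for every i < len(want): Pre_ excludes len(number) < len(want), where A raises IndexError.
def Pre_solution (want : List String) (number : List Int) (discount : List String) : Prop :=
  want.length ≤ number.length
instance (want : List String) (number : List Int) (discount : List String) : Decidable (Pre_solution want number discount) := by unfold Pre_solution; infer_instance

def pvWitness_solution : List String × List Int × List String :=
  (["a"], [1], ["a", "b", "a"])

def Spec_solution (want : List String) (number : List Int) (discount : List String) (out : Int) : Prop := out = solution_alt want number discount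
instance (want : List String) (number : List Int) (discount : List String) (out : Int) : Decidable (Spec_solution want number discount out) := by unfold Spec_solution; infer_instance

-- ===== CLAIM (what is proved, stated in full; the proofs are below) =====
def Claim_equal_solution : Prop := ∀ (want : List String) (number : List Int) (discount : List String), Dom_solution want number discount → Pre_solution want number discount → Spec_solution want number discount (solution want number discount)


-- ===== LEMMAS AND PROOFS =====

-- the condition both programs test on day i: every wanted amount is covered by the window
-- discount[max(0,i-9):i+1] = (ds.take (i+1)).drop (i+1-10)
def condN (wn : PySem.Dict String Int) (ds : List String) (i : Nat) : Bool :=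
  wn.keys.all (fun k => decide (wn.getD k 0 ≤ (((ds.take (i + 1)).drop (i + 1 - 10)).count k : Int)))

lemma list_all_congr {α : Type} (l : List α) (p q : α → Bool) (h : ∀ x ∈ l, p x = q x) :
    l.all p = l.all q := by
  induction l with
  | nil => rfl
  | cons a l ih =>
    simp only [List.all_cons, h a (by simp), ih (fun x hx => h x (by simp [hx]))]

lemma build_aux (w : List String) : ∀ (nm : List Int), w.length ≤ nm.length →
    ∀ (d : PySem.Dict String Int),
    (List.range w.length).foldl
      (fun d (k : Nat) =>
        match PySem.List.pyGet? w (k : Int), PySem.List.pyGet? nm (k : Int) with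
        | some a, some b => d.insert a b
        | _, _ => d) d
    = (w.zip nm).foldl (fun d p => d.insert p.1 p.2) d := by
  induction w with
  | nil => intro nm _ d; rfl
  | cons a w ih =>
    intro nm h d
    cases nm with
    | nil => simp at h
    | cons b nm =>
      simp only [List.length_cons, List.range_succ_eq_map, List.foldl_cons, List.foldl_map,
        List.zip_cons_cons]
      rw [PySem.List.foldl_congr_mem _ _
        (fun d (k : Nat) =>
          match PySem.List.pyGet? w (k : Int), PySem.List.pyGet? nm (k : Int) with
          | some a, some b => d.insert a b
          | _, _ => d) _ ?_]
      · simp only [Nat.cast_zero, PySem.List.pyGet?_zero_cons]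
        exact ih nm (by simpa using h) _
      · intro acc k _
        have h1 : ((Nat.succ k : Nat) : Int) = (k : Int) + 1 := by push_cast; ring
        rw [h1, PySem.List.pyGet?_cons_succ, PySem.List.pyGet?_cons_succ]

lemma build_eq (want : List String) (number : List Int) (h : want.length ≤ number.length) :
    buildWantA want number = buildWantB want number := by
  unfold buildWantA buildWantB
  rw [PySem.List.len_eq, PySem.List.pyRange_zero_natCast, List.foldl_map]
  exact build_aux want number h _

-- List.count over a cons, with the test written as `k = a` (the orientation A's branches use)
lemma ccons (k a : String) (t : List String) :
    (a :: t).count k = t.count k + (if k = a then 1 else 0) := by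
  rcases eq_or_ne k a with rfl | h
  · simp
  · simp [h, h.symm]

-- invariant of A's loop over a prefix ds of the discount list
lemma A_loop (wn : PySem.Dict String Int) (hnd : wn.keys.Nodup) (full : List String) (r0 : Int)
    (ds : List String) (hpre : ds <+: full) :
    ((PySem.List.enumerate ds 0).foldl (stepA full) (wn, r0)).1.keys = wn.keys ∧
    (∀ k ∈ wn.keys, ((PySem.List.enumerate ds 0).foldl (stepA full) (wn, r0)).1.getD k 0
        = wn.getD k 0 - ((ds.drop (ds.length - 10)).count k : Int)) ∧
    ((PySem.List.enumerate ds 0).foldl (stepA full) (wn, r0)).2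
        = r0 + ((List.range ds.length).countP (condN wn ds) : Int) := by
  induction ds using List.reverseRecOn with
  | nil => simp [PySem.List.enumerate]
  | append_singleton ds x ih =>
    have hds : ds <+: full := ((ds.prefix_append [x]).trans hpre)
    obtain ⟨hk, hg, hr⟩ := ih hds
    set M := (PySem.List.enumerate ds 0).foldl (stepA full) (wn, r0) with hM
    set l := ds.length with hl
    have henum : PySem.List.enumerate (ds ++ [x]) 0
        = PySem.List.enumerate ds 0 ++ [((l : Int), x)] := by
      rw [PySem.List.enumerate_append]
      simp [PySem.List.enumerate, ← hl]
    rw [henum, List.foldl_append, List.foldl_cons, List.foldl_nil, ← hM]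
    -- the single step
    have hlen : l < full.length := by
      have := hpre.length_le
      simp only [List.length_append, List.length_singleton] at this
      omega
    -- d1 facts
    set d1 := if M.1.contains x then M.1.modify x 0 (· - 1) else M.1 with hd1def
    have hk1 : d1.keys = wn.keys := by
      rw [hd1def]; split
      · rw [PySem.Dict.keys_modify, PySem.Dict.keys_insert_of_contains _ _ (by assumption), hk]
      · exact hk
    have hmemcont : ∀ k ∈ wn.keys, M.1.contains k = true := by
      intro k hkm
      rw [PySem.Dict.contains_eq_decide_mem_keys, hk]
      simpa using hkm
    have hd1 : ∀ k ∈ wn.keys, d1.getD k 0 = M.1.getD k 0 - (if k = x then 1 else 0) := by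
      intro k hkm
      rw [hd1def]
      by_cases hcx : M.1.contains x = true
      · simp only [hcx, if_true, PySem.Dict.getD_modify]
        split_ifs with h
        · rw [h]
        · ring
      · have hne : k ≠ x := by
          intro he; exact hcx (he ▸ hmemcont k hkm)
        simp [hcx, hne]
    -- d2 facts
    set d2 := if (10 : Int) ≤ (l : Int) then
        (if d1.contains (PySem.List.pyGetD full ((l : Int) - 10) "") then
          d1.modify (PySem.List.pyGetD full ((l : Int) - 10) "") 0 (· + 1) else d1)
      else d1 with hd2def
    have hk2 : d2.keys = wn.keys := by
      rw [hd2def]; split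
      · split
        · rw [PySem.Dict.keys_modify, PySem.Dict.keys_insert_of_contains _ _ (by assumption), hk1]
        · exact hk1
      · exact hk1
    have hnd2 : d2.keys.Nodup := hk2 ▸ hnd
    have hmemcont1 : ∀ k ∈ wn.keys, d1.contains k = true := by
      intro k hkm
      rw [PySem.Dict.contains_eq_decide_mem_keys, hk1]
      simpa using hkm
    -- getD of d2 at every wanted key equals wn minus the count in the NEW window
    have hwin2 : ∀ k ∈ wn.keys, d2.getD k 0
        = wn.getD k 0 - ((((ds ++ [x]).drop (l + 1 - 10)).count k : Int)) := by
      intro k hkm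
      by_cases h10 : (10 : Int) ≤ (l : Int)
      · have hl10 : 10 ≤ l := by exact_mod_cast h10
        have hcast : ((l : Int) - 10) = ((l - 10 : Nat) : Int) := by omega
        have hidx : l - 10 < full.length := by omega
        have hidx' : l - 10 < ds.length := by omega
        have hprev : PySem.List.pyGetD full ((l : Int) - 10) "" = ds[l - 10] := by
          rw [hcast, PySem.List.pyGetD_natCast, List.getD_eq_getElem full "" hidx]
          exact (hds.getElem hidx').symm
        have hd2g : d2.getD k 0 = d1.getD k 0 + (if k = ds[l - 10] then 1 else 0) := by
          rw [hd2def, if_pos h10, hprev]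
          by_cases hcp : d1.contains ds[l - 10] = true
          · simp only [hcp, if_true, PySem.Dict.getD_modify]
            split_ifs with h
            · rw [h]
            · ring
          · have hne : k ≠ ds[l - 10] := by
              intro he; exact hcp (he ▸ hmemcont1 k hkm)
            simp [hcp, hne]
        rw [hd2g, hd1 k hkm, hg k hkm]
        have hdrop : (ds ++ [x]).drop (l + 1 - 10) = ds.drop (l - 9) ++ [x] := by
          have : l + 1 - 10 = l - 9 := by omega
          rw [this, List.drop_append_of_le_length (by omega)]
        have h9 : l - 10 + 1 = l - 9 := by omega
        have holdwin : ds.drop (l - 10) = ds[l - 10] :: ds.drop (l - 9) := by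
          rw [List.drop_eq_getElem_cons hidx', h9]
        rw [hdrop, holdwin, List.count_append, ccons k, ccons k, List.count_nil]
        split_ifs <;> push_cast <;> ring
      · have hl10 : l < 10 := by omega
        have h0 : l - 10 = 0 := by omega
        have h0' : l + 1 - 10 = 0 := by omega
        rw [hd2def, if_neg h10, hd1 k hkm, hg k hkm, h0, h0', List.drop_zero, List.drop_zero,
          List.count_append, ccons k, List.count_nil]
        split_ifs <;> push_cast <;> ring
    -- the Boolean test equals condN at index l
    have hcond : d2.values.all (fun v => decide (v ≤ 0)) = condN wn (ds ++ [x]) l := by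
      rw [PySem.Dict.values_eq_map_keys d2 hnd2 0, List.all_map, hk2]
      unfold condN
      apply list_all_congr
      intro k hkm
      simp only [Function.comp]
      have htake : (ds ++ [x]).take (l + 1) = ds ++ [x] := by
        apply List.take_of_length_le
        simp [hl]
      simp only [hwin2 k hkm, htake, decide_eq_decide]
      omega
    -- countP over range (l+1)
    have hcount : ((List.range (l + 1)).countP (condN wn (ds ++ [x])) : Int)
        = ((List.range l).countP (condN wn ds) : Int)
          + (if condN wn (ds ++ [x]) l = true then 1 else 0) := by
      rw [List.range_succ, List.countP_append]
      have hsame : (List.range l).countP (condN wn (ds ++ [x]))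
          = (List.range l).countP (condN wn ds) := by
        apply List.countP_congr
        intro i hi
        have hil : i < l := List.mem_range.mp hi
        unfold condN
        rw [List.take_append_of_le_length (by omega)]
      rw [hsame, List.countP_cons, List.countP_nil]
      split_ifs <;> push_cast <;> ring
    constructor
    · show d2.keys = wn.keys
      exact hk2
    constructor
    · intro k hkm
      show d2.getD k 0 = _
      rw [hwin2 k hkm]
      simp only [List.length_append, List.length_singleton, ← hl]
    · show (if d2.values.all (fun v => decide (v ≤ 0)) = true then M.2 + 1 else M.2) = _
      rw [hcond, hr]
      simp only [List.length_append, List.length_singleton, ← hl]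
      rw [hcount]
      split_ifs <;> ring
  
lemma nodup_buildWantB (want : List String) (number : List Int) :
    (buildWantB want number).keys.Nodup := by
  unfold buildWantB
  exact PySem.Dict.nodup_keys_foldl_insert_key _ Prod.fst (fun d p => p.2) _
    PySem.Dict.nodup_keys_empty

lemma B_loop (want : List String) (number : List Int) (discount : List String) :
    solution_alt want number discount
      = ((List.range discount.length).countP (condN (buildWantB want number) discount) : Int) := by
  have hnd := nodup_buildWantB want number
  unfold solution_alt
  rw [PySem.List.len_eq, PySem.List.pyRange_zero_natCast, List.foldl_map]
  rw [PySem.List.foldl_congr_mem _ _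
    (fun r (m : Nat) => if condN (buildWantB want number) discount m = true then r + 1 else r) 0 ?_]
  · rw [PySem.List.foldl_if_add_one]
    ring
  · intro acc m _
    have ha : (max 0 ((m : Int) - 9)).toNat = m - 9 := by
      by_cases h : (9 : Int) ≤ (m : Int)
      · rw [max_eq_right (by omega)]; omega
      · rw [max_eq_left (by omega)]; omega
    have hwindow : windowB discount (m : Int)
        = (discount.take (m + 1)).drop (m + 1 - 10) := by
      unfold windowB
      rw [PySem.List.slice_toNat discount (le_max_left _ _) (by omega), ha]
      rw [List.drop_take]
      have h1 : m + 1 - 10 = m - 9 := by omega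
      have h2 : ((m : Int) + 1).toNat = m + 1 := by omega
      rw [h1, h2]
    have hcond : ((buildWantB want number).items.all
          (fun p => decide (p.2 ≤ (countsB discount (m : Int)).getD p.1 0)))
        = condN (buildWantB want number) discount m := by
      rw [PySem.Dict.items_eq_map_keys _ hnd 0, List.all_map]
      unfold condN
      apply list_all_congr
      intro k hkm
      simp only [Function.comp]
      unfold countsB
      rw [hwindow, PySem.Dict.getD_foldl_insert_add_one, PySem.Dict.getD_empty, zero_add]
    unfold stepB
    rw [hcond]

-- ===== VERDICT (by name: the statement is the Claim_ definition above) =====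
theorem solution_spec : Claim_equal_solution := by
  intro want number discount _ hpre
  unfold Spec_solution
  unfold solution
  rw [build_eq want number hpre]
  have hnd := nodup_buildWantB want number
  have h := (A_loop (buildWantB want number) hnd discount 0 discount (List.prefix_refl discount)).2.2
  rw [h, B_loop]
  ring
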